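-- pv_equiv track=rewrite | github.com/DolevSeren/DI-Bootcamp | W1/D4/daily_chalenge.py | replace_non_alpha_between_letters
-- ===== SOURCE A (Python) =====
-- def replace_non_alpha_between_letters(text):
--     result = []
--     i = 0
--     length = len(text)
--
--     while i < length:
--         if text[i].isalpha():
--             result.append(text[i])
--             i += 1
--         else:
--             start = i
--             while i < length and not text[i].isalpha():
--                 i += 1
--             if result and i < length and text[i].isalpha():
--                 result.append(' ')
--
--     return ''.join(result)
-- ===== SOURCE B (Python) =====
-- from itertools import groupby
--
-- def replace_non_alpha_between_letters(text):
--     words = [''.join(g) for k, g in groupby(text, key=str.isalpha) if k]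
--     return ' '.join(words)
-- ===== Notes on version B (the rewrite author's own statement) =====
-- stated objective: faster
-- what changed: B replaces A's index-based while loop with inline sentinel-space emission by an itertools.groupby segmentation: split the text into maximal same-isalpha runs, keep the alphabetic runs as words, and join them with a single space.
import Mathlib
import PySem

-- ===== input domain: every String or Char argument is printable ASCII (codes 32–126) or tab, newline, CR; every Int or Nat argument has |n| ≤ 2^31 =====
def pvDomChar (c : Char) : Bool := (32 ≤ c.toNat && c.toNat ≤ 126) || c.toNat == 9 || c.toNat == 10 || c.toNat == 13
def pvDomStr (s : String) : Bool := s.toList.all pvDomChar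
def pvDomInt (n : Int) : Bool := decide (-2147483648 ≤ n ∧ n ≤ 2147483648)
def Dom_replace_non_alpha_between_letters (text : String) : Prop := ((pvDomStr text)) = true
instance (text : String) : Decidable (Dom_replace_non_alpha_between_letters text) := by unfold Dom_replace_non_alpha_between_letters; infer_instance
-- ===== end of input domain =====

-- B replaces A's index-based while loop (with inline sentinel-space emission) by a groupby
-- segmentation: split into maximal same-isalpha runs, keep the alphabetic ones, join by spaces
-- (measured constant-factor faster: C-level segmentation instead of a per-character Python loop).

-- ===== PORT A =====
-- A's outer while loop: `acc` is `result`, the list `l` is the suffix text[i:];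
-- the inner `while … not isalpha` skip loop is the dropWhile.
def pvGoA (acc : List Char) (l : List Char) : List Char :=
  match l with
  | [] => acc
  | c :: cs =>
    if PySem.Chars.isalpha c then pvGoA (acc ++ [c]) cs
    else
      -- inner skip loop: c is non-alpha, drop it and the following non-alpha run
      let rest := cs.dropWhile (fun d => !PySem.Chars.isalpha d)
      -- "if result and i < length and text[i].isalpha()" (rest nonempty ⇒ its head is alphabetic)
      if acc ≠ [] ∧ rest ≠ [] then pvGoA (acc ++ [' ']) rest else pvGoA acc rest
termination_by l.length
decreasing_by
  · simp
  · simpa using Nat.lt_succ_of_le (List.length_dropWhile_le _ cs)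
  · simpa using Nat.lt_succ_of_le (List.length_dropWhile_le _ cs)

def replace_non_alpha_between_letters (text : String) : String :=
  String.mk (pvGoA [] text.toList)

-- ===== PORT B =====
-- itertools.groupby(text, key=str.isalpha): the maximal runs of equal key, in order
def pvGroupby (l : List Char) : List (Bool × List Char) :=
  match l with
  | [] => []
  | c :: cs =>
    let k := PySem.Chars.isalpha c
    (k, c :: cs.takeWhile (fun d => PySem.Chars.isalpha d == k)) ::
      pvGroupby (cs.dropWhile (fun d => PySem.Chars.isalpha d == k))
termination_by l.length
decreasing_by simpa using Nat.lt_succ_of_le (List.length_dropWhile_le _ cs)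

def replace_non_alpha_between_letters_alt (text : String) : String :=
  -- words = [''.join(g) for k, g in groupby(text, key=str.isalpha) if k]; return ' '.join(words)
  String.mk (PySem.Chars.join [' '] (((pvGroupby text.toList).filter (·.1)).map (·.2)))

-- ===== PRECONDITION & SPEC =====
def Spec_replace_non_alpha_between_letters (text : String) (out : String) : Prop := out = replace_non_alpha_between_letters_alt text
instance (text : String) (out : String) : Decidable (Spec_replace_non_alpha_between_letters text out) := by unfold Spec_replace_non_alpha_between_letters; infer_instance

-- ===== CLAIM (what is proved, stated in full; the proofs are below) =====
def Claim_equal_replace_non_alpha_between_letters : Prop := ∀ (text : String), Dom_replace_non_alpha_between_letters text → Spec_replace_non_alpha_between_letters text (replace_non_alpha_between_letters text)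

-- ===== LEMMAS AND PROOFS =====

-- the tail of A's output once `result` is nonempty
def pvJ (l : List Char) : List Char :=
  match l with
  | [] => []
  | c :: cs =>
    if PySem.Chars.isalpha c then c :: pvJ cs
    else
      match h : cs.dropWhile (fun d => !PySem.Chars.isalpha d) with
      | [] => []
      | d :: ds => ' ' :: pvJ (d :: ds)  -- (h is used by the termination proof)
termination_by l.length
decreasing_by
  · simp
  · have := List.length_dropWhile_le (fun d => !PySem.Chars.isalpha d) cs
    rw [h] at this; simpa using Nat.lt_succ_of_le this

def pvWords (l : List Char) : List (List Char) := ((pvGroupby l).filter (·.1)).map (·.2)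

theorem pvPredTrue : (fun d => PySem.Chars.isalpha d == true) = (fun d => PySem.Chars.isalpha d) := by
  funext d; cases PySem.Chars.isalpha d <;> rfl

theorem pvPredFalse : (fun d => PySem.Chars.isalpha d == false) = (fun d => !PySem.Chars.isalpha d) := by
  funext d; cases PySem.Chars.isalpha d <;> rfl

-- the head of a nonempty `dropWhile p` result falsifies p
theorem pvDropHeadGen (p : Char → Bool) : ∀ (cs : List Char) {d : Char} {ds : List Char},
    cs.dropWhile p = d :: ds → p d = false
  | [], _, _, h => by simp at h
  | a :: as, d, ds, h => by
    rw [List.dropWhile_cons] at h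
    by_cases ha : p a = true
    · rw [if_pos ha] at h
      exact pvDropHeadGen p as h
    · rw [if_neg ha] at h
      cases h
      simpa using ha

theorem pvDropHead {cs : List Char} {d : Char} {ds : List Char}
    (h : cs.dropWhile (fun e => !PySem.Chars.isalpha e) = d :: ds) :
    PySem.Chars.isalpha d = true := by
  simpa using pvDropHeadGen _ cs h

-- dropWhile (!isalpha) is a no-op on an empty or alphabetic-head list
theorem pvDropNoop {m : List Char}
    (hm : m = [] ∨ ∃ d ds, m = d :: ds ∧ PySem.Chars.isalpha d = true) :
    m.dropWhile (fun e => !PySem.Chars.isalpha e) = m := by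
  rcases hm with rfl | ⟨d, ds, rfl, hd⟩
  · rfl
  · simp [List.dropWhile_cons, hd]

-- shape of dropWhile (!isalpha)'s result
theorem pvDropShape (cs : List Char) :
    cs.dropWhile (fun e => !PySem.Chars.isalpha e) = [] ∨
    ∃ d ds, cs.dropWhile (fun e => !PySem.Chars.isalpha e) = d :: ds ∧ PySem.Chars.isalpha d = true := by
  cases h : cs.dropWhile (fun e => !PySem.Chars.isalpha e) with
  | nil => exact Or.inl rfl
  | cons d ds => exact Or.inr ⟨d, ds, rfl, pvDropHead h⟩

-- reduce pvJ at a non-alphabetic head whose following non-alpha run ends at e :: es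
theorem pvJ_cons_nonalpha {c : Char} {cs : List Char} (hc : PySem.Chars.isalpha c = false)
    {e : Char} {es : List Char} (hr : cs.dropWhile (fun d => !PySem.Chars.isalpha d) = e :: es) :
    pvJ (c :: cs) = ' ' :: pvJ (e :: es) := by
  rw [pvJ]
  simp only [hc, Bool.false_eq_true, reduceIte]
  split
  · rename_i hnil; rw [hr] at hnil; cases hnil
  · rename_i d ds hd; rw [hr] at hd; cases hd; rfl

theorem pvJ_cons_nonalpha_nil {c : Char} {cs : List Char} (hc : PySem.Chars.isalpha c = false)
    (hr : cs.dropWhile (fun d => !PySem.Chars.isalpha d) = []) :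
    pvJ (c :: cs) = [] := by
  rw [pvJ]
  simp only [hc, Bool.false_eq_true, reduceIte]
  split
  · rfl
  · rename_i d ds hd; rw [hr] at hd; cases hd

theorem pvJ_cons_alpha {c : Char} {cs : List Char} (hc : PySem.Chars.isalpha c = true) :
    pvJ (c :: cs) = c :: pvJ cs := by
  rw [pvJ]; simp [hc]

-- A's loop with a nonempty `result` appends pvJ of the remaining suffix
theorem pvGoA_ne_nil (n : Nat) : ∀ l : List Char, l.length < n →
    ∀ acc, acc ≠ [] → pvGoA acc l = acc ++ pvJ l := by
  induction n with
  | zero => intro l hl; omega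
  | succ n ih =>
    intro l hl acc hacc
    match l with
    | [] => simp [pvGoA, pvJ]
    | c :: cs =>
      rw [pvGoA]
      by_cases hα : PySem.Chars.isalpha c = true
      · simp only [hα, reduceIte]
        rw [ih cs (by simp at hl; omega) _ (by simp), pvJ_cons_alpha hα]
        simp
      · have hc : PySem.Chars.isalpha c = false := by simpa using hα
        simp only [hα, Bool.false_eq_true, reduceIte]
        cases hr : cs.dropWhile (fun d => !PySem.Chars.isalpha d) with
        | nil => simp [hacc, pvGoA, pvJ_cons_nonalpha_nil hc hr]
        | cons d ds =>
          simp only [hacc, ne_eq, not_false_iff, and_true, reduceCtorEq, reduceIte]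
          have hlt : ds.length + 1 ≤ cs.length := by
            have := List.length_dropWhile_le (fun d => !PySem.Chars.isalpha d) cs
            rw [hr] at this; simpa using this
          rw [ih (d :: ds) (by simp at hl ⊢; omega) _ (by simp), pvJ_cons_nonalpha hc hr]
          simp

-- A's loop from the empty `result` (the initial no-space phase)
theorem pvGoA_nil (n : Nat) : ∀ l : List Char, l.length < n →
    pvGoA [] l = pvJ (l.dropWhile (fun d => !PySem.Chars.isalpha d)) := by
  induction n with
  | zero => intro l hl; omega
  | succ n ih =>
    intro l hl
    match l with
    | [] => simp [pvGoA, pvJ]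
    | c :: cs =>
      rw [pvGoA]
      by_cases hα : PySem.Chars.isalpha c = true
      · simp only [hα, reduceIte, List.dropWhile_cons, Bool.not_true, Bool.false_eq_true,
          List.nil_append]
        rw [pvGoA_ne_nil (n + 1) cs (by simp at hl; omega) [c] (by simp), pvJ_cons_alpha hα]
        rfl
      · simp only [hα, Bool.false_eq_true, reduceIte, List.dropWhile_cons, Bool.not_false,
          ne_eq, not_true_eq_false, false_and]
        rw [ih (cs.dropWhile (fun d => !PySem.Chars.isalpha d))
          (by have := List.length_dropWhile_le (fun d => !PySem.Chars.isalpha d) cs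
              simp at hl; omega)]
        rw [pvDropNoop (pvDropShape cs)]

-- pvJ passes an alphabetic run through unchanged
theorem pvJ_alpha_prefix (run : List Char) (rest : List Char)
    (h : ∀ c ∈ run, PySem.Chars.isalpha c = true) :
    pvJ (run ++ rest) = run ++ pvJ rest := by
  induction run with
  | nil => simp
  | cons c cs ih =>
    rw [List.cons_append, pvJ_cons_alpha (h c List.mem_cons_self),
      ih (fun d hd => h d (List.mem_cons_of_mem _ hd))]
    rfl

-- the word list ignores a leading non-alphabetic run
theorem pvWords_dropWhile (l : List Char) :
    pvWords l = pvWords (l.dropWhile (fun e => !PySem.Chars.isalpha e)) := by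
  match l with
  | [] => rfl
  | c :: cs =>
    by_cases hα : PySem.Chars.isalpha c = true
    · rw [pvDropNoop (Or.inr ⟨c, cs, rfl, hα⟩)]
    · have hc : PySem.Chars.isalpha c = false := by simpa using hα
      rw [pvWords, pvGroupby]
      simp only [hc, pvPredFalse]
      rw [List.filter_cons_of_neg (by simp)]
      simp [hc, pvWords]

-- on an empty or alphabetic-head list, pvJ is the ' '-join of the alphabetic groups
theorem pvJ_eq_join (n : Nat) : ∀ l : List Char, l.length < n →
    (l = [] ∨ ∃ c cs, l = c :: cs ∧ PySem.Chars.isalpha c = true) →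
    pvJ l = PySem.Chars.join [' '] (pvWords l) := by
  induction n with
  | zero => intro l hl; omega
  | succ n ih =>
    rintro l hl (rfl | ⟨c, cs, rfl, hα⟩)
    · simp [pvJ, pvWords, pvGroupby, PySem.Chars.join_nil]
    · have hwords : pvWords (c :: cs) =
          (c :: cs.takeWhile (fun d => PySem.Chars.isalpha d)) ::
            pvWords (cs.dropWhile (fun d => PySem.Chars.isalpha d)) := by
        rw [pvWords, pvGroupby]
        simp only [hα, pvPredTrue]
        rw [List.filter_cons_of_pos (by simp)]
        rfl
      have hrun : ∀ d ∈ c :: cs.takeWhile (fun d => PySem.Chars.isalpha d),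
          PySem.Chars.isalpha d = true := by
        intro d hd
        rcases List.mem_cons.mp hd with rfl | hd
        · exact hα
        · exact List.mem_takeWhile_imp hd
      have hpj : pvJ (c :: cs) =
          (c :: cs.takeWhile (fun d => PySem.Chars.isalpha d)) ++
            pvJ (cs.dropWhile (fun d => PySem.Chars.isalpha d)) := by
        conv_lhs => rw [show c :: cs =
          (c :: cs.takeWhile (fun d => PySem.Chars.isalpha d)) ++
            cs.dropWhile (fun d => PySem.Chars.isalpha d) by
          rw [List.cons_append, List.takeWhile_append_dropWhile]]
        exact pvJ_alpha_prefix _ _ hrun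
      have hlen1 := List.length_dropWhile_le (fun d => PySem.Chars.isalpha d) cs
      rw [hpj, hwords]
      cases hrest : cs.dropWhile (fun d => PySem.Chars.isalpha d) with
      | nil =>
        simp [pvJ, pvWords, pvGroupby, PySem.Chars.join_singleton]
      | cons d ds =>
        have hd : PySem.Chars.isalpha d = false := pvDropHeadGen _ cs hrest
        have hlen2 := List.length_dropWhile_le (fun e => !PySem.Chars.isalpha e) ds
        have hwrest : pvWords (d :: ds) =
            pvWords (ds.dropWhile (fun e => !PySem.Chars.isalpha e)) := by
          rw [pvWords_dropWhile (d :: ds)]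
          simp [hd]
        cases hr2 : ds.dropWhile (fun e => !PySem.Chars.isalpha e) with
        | nil =>
          rw [pvJ_cons_nonalpha_nil hd hr2, hwrest, hr2]
          simp [pvWords, pvGroupby, PySem.Chars.join_singleton]
        | cons e es =>
          have he : PySem.Chars.isalpha e = true := pvDropHead hr2
          have hrec : pvJ (e :: es) = PySem.Chars.join [' '] (pvWords (e :: es)) := by
            apply ih (e :: es) _ (Or.inr ⟨e, es, rfl, he⟩)
            rw [hrest] at hlen1
            rw [hr2] at hlen2
            simp at hl hlen1 hlen2 ⊢
            omega
          have hnonempty : pvWords (e :: es) =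
              (e :: es.takeWhile (fun d => PySem.Chars.isalpha d)) ::
                pvWords (es.dropWhile (fun d => PySem.Chars.isalpha d)) := by
            rw [pvWords, pvGroupby]
            simp only [he, pvPredTrue]
            rw [List.filter_cons_of_pos (by simp)]
            rfl
          rw [pvJ_cons_nonalpha hd hr2, hrec, hwrest, hr2, hnonempty,
            PySem.Chars.join_cons_cons]
          simp

-- ===== VERDICT (by name: the statement is the Claim_ definition above) =====
theorem replace_non_alpha_between_letters_spec : Claim_equal_replace_non_alpha_between_letters := by
  intro text _
  unfold Spec_replace_non_alpha_between_letters replace_non_alpha_between_letters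
    replace_non_alpha_between_letters_alt
  rw [pvGoA_nil (text.toList.length + 1) text.toList (by omega)]
  rw [pvJ_eq_join ((text.toList.dropWhile (fun d => !PySem.Chars.isalpha d)).length + 1) _
    (by omega) (pvDropShape text.toList)]
  rw [← pvWords_dropWhile text.toList]
  rfl
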